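-- pv_equiv track=rewrite | github.com/DalgoT4D/DDP_backend | ddpui/core/dashboard_chat/orchestration/state/payload_codec.py | serialize_distinct_payloads
-- ===== SOURCE A (Python) =====
-- from typing import Any
--
-- def serialize_distinct_payloads(
--     validated_distinct_values: set[tuple[str, str, str]],
-- ) -> dict[str, Any]:
--     """Convert validated distinct values into a checkpoint-safe nested payload."""
--     serialized: dict[str, dict[str, list[str]]] = {}
--     for table_name, column_name, value in validated_distinct_values:
--         serialized.setdefault(table_name, {}).setdefault(column_name, []).append(value)
--
--     return {
--         table_name: {
--             column_name: sorted(set(values))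
--             for column_name, values in column_map.items()
--         }
--         for table_name, column_map in serialized.items()
--     }
-- ===== SOURCE B (Python) =====
-- def serialize_distinct_payloads(
--     validated_distinct_values: set[tuple[str, str, str]],
-- ) -> dict:
--     """One pass: keep each column's value list sorted & duplicate-free while inserting,
--     instead of grouping first and running sorted(set(...)) over every group afterwards."""
--     serialized: dict[str, dict[str, list[str]]] = {}
--     for table_name, column_name, value in validated_distinct_values:
--         columns = serialized.setdefault(table_name, {})
--         columns[column_name] = _insert_sorted_unique(columns.get(column_name, []), value)
--     return serialized
--
--
-- def _insert_sorted_unique(values: list[str], value: str) -> list[str]: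
--     i = 0
--     while i < len(values) and values[i] < value:
--         i += 1
--     if i < len(values) and values[i] == value:
--         return values
--     return values[:i] + [value] + values[i:]
-- ===== Notes on version B (the rewrite author's own statement) =====
-- stated objective: alternative
-- what changed: B builds the nested payload in a single pass, maintaining each column's value list sorted and duplicate-free by ordered insertion, instead of A's append-everything grouping followed by a per-group sorted(set(...)) rebuild.
import Mathlib
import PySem

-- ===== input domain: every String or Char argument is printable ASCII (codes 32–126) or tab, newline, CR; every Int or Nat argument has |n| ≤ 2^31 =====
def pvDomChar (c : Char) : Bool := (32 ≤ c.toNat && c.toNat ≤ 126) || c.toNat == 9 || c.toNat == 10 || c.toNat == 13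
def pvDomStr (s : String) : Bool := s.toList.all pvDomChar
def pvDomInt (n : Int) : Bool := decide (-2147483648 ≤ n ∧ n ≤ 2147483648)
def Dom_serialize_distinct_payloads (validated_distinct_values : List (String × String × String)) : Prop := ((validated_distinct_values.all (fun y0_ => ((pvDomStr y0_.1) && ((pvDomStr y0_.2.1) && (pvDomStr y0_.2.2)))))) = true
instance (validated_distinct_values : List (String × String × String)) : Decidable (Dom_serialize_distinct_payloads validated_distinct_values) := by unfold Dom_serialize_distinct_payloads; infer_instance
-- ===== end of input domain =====

-- B groups in one pass keeping each value list sorted & duplicate-free by ordered insertion,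
-- instead of A's append-grouping followed by sorted(set(...)) per group (objective: alternative).
-- The Python set argument is the List of its distinct elements; dict outputs are association lists in insertion order.

-- ===== PORT A =====
def serialize_distinct_payloads (validated_distinct_values : List (String × String × String)) : List (String × List (String × List String)) :=
  let serialized : PySem.Dict String (PySem.Dict String (List String)) :=
    validated_distinct_values.foldl (fun d x =>
      let inner := d.getD x.1 PySem.Dict.empty
      d.insert x.1 (inner.insert x.2.1 (inner.getD x.2.1 [] ++ [x.2.2]))) PySem.Dict.empty
  serialized.items.map (fun tp =>
    (tp.1, tp.2.items.map (fun cp =>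
      (cp.1, PySem.List.sorted (PySem.Set.ofList cp.2) (fun s => s) false))))

-- ===== PORT B =====
-- linear scan to the insertion point; unchanged if the value is already present
def insSortedUnique (values : List String) (value : String) : List String :=
  match values with
  | [] => [value]
  | x :: xs =>
    if x < value then x :: insSortedUnique xs value
    else if x = value then x :: xs
    else value :: x :: xs

def serialize_distinct_payloads_alt (validated_distinct_values : List (String × String × String)) : List (String × List (String × List String)) :=
  let serialized : PySem.Dict String (PySem.Dict String (List String)) :=
    validated_distinct_values.foldl (fun d x =>
      let columns := d.getD x.1 PySem.Dict.empty
      d.insert x.1 (columns.insert x.2.1 (insSortedUnique (columns.getD x.2.1 []) x.2.2))) PySem.Dict.empty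
  serialized.items.map (fun tp => (tp.1, tp.2.items))

-- ===== PRECONDITION & SPEC =====
def Spec_serialize_distinct_payloads (validated_distinct_values : List (String × String × String)) (out : List (String × List (String × List String))) : Prop := out = serialize_distinct_payloads_alt validated_distinct_values
instance (validated_distinct_values : List (String × String × String)) (out : List (String × List (String × List String))) : Decidable (Spec_serialize_distinct_payloads validated_distinct_values out) := by unfold Spec_serialize_distinct_payloads; infer_instance

-- ===== CLAIM (what is proved, stated in full; the proofs are below) =====
def Claim_equal_serialize_distinct_payloads : Prop := ∀ (validated_distinct_values : List (String × String × String)), Dom_serialize_distinct_payloads validated_distinct_values → Spec_serialize_distinct_payloads validated_distinct_values (serialize_distinct_payloads validated_distinct_values)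

-- ===== LEMMAS AND PROOFS =====

def sortedDedup (l : List String) : List String :=
  PySem.List.sorted (PySem.Set.ofList l) (fun s => s) false

def mapVal {κ ν ν' : Type} (f : ν → ν') (d : PySem.Dict κ ν) : PySem.Dict κ ν' :=
  PySem.Dict.mk (d.items.map (fun p => (p.1, f p.2)))

theorem insU_mem {v y : String} {xs : List String} :
    y ∈ insSortedUnique xs v ↔ y = v ∨ y ∈ xs := by
  induction xs with
  | nil => simp [insSortedUnique]
  | cons x xs ih =>
    simp only [insSortedUnique]
    split_ifs with h1 h2
    · simp only [List.mem_cons, ih]; tauto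
    · subst h2; simp only [List.mem_cons]; tauto
    · simp only [List.mem_cons]

theorem insU_of_mem {v : String} {xs : List String}
    (hs : xs.Pairwise (· < ·)) (hv : v ∈ xs) : insSortedUnique xs v = xs := by
  induction xs with
  | nil => cases hv
  | cons x xs ih =>
    simp only [insSortedUnique]
    rcases List.mem_cons.mp hv with rfl | hv'
    · simp
    · have hx : x < v := (List.pairwise_cons.mp hs).1 v hv'
      simp [hx, ih (List.pairwise_cons.mp hs).2 hv']

theorem insU_perm {v : String} {xs : List String} (hv : v ∉ xs) :
    (insSortedUnique xs v).Perm (xs ++ [v]) := by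
  induction xs with
  | nil => simp [insSortedUnique]
  | cons x xs ih =>
    have hvx : v ≠ x := fun h => hv (h ▸ List.mem_cons_self)
    have hv' : v ∉ xs := fun h => hv (List.mem_cons_of_mem _ h)
    simp only [insSortedUnique]
    split_ifs with h1 h2
    · exact List.Perm.cons x (ih hv')
    · exact absurd h2.symm hvx
    · exact (List.perm_append_singleton v (x :: xs)).symm

theorem insU_pairwise {v : String} {xs : List String}
    (hs : xs.Pairwise (· < ·)) (hv : v ∉ xs) :
    (insSortedUnique xs v).Pairwise (· < ·) := by
  induction xs with
  | nil => simp [insSortedUnique]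
  | cons x xs ih =>
    have hvx : v ≠ x := fun h => hv (h ▸ List.mem_cons_self)
    have hv' : v ∉ xs := fun h => hv (List.mem_cons_of_mem _ h)
    obtain ⟨hxlt, htl⟩ := List.pairwise_cons.mp hs
    simp only [insSortedUnique]
    split_ifs with h1 h2
    · refine List.pairwise_cons.mpr ⟨?_, ih htl hv'⟩
      intro y hy
      rcases insU_mem.mp hy with rfl | hy'
      · exact h1
      · exact hxlt y hy'
    · exact absurd h2.symm hvx
    · have hvltx : v < x := lt_of_le_of_ne (le_of_not_gt h1) hvx
      refine List.pairwise_cons.mpr ⟨?_, hs⟩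
      intro y hy
      rcases List.mem_cons.mp hy with rfl | hy'
      · exact hvltx
      · exact lt_trans hvltx (hxlt y hy')

theorem sortedDedup_append_singleton (l : List String) (v : String) :
    sortedDedup (l ++ [v]) = insSortedUnique (sortedDedup l) v := by
  have hset : PySem.Set.ofList (l ++ [v]) = PySem.Set.add (PySem.Set.ofList l) v :=
    PySem.Set.ofList_append_singleton l v
  have hpw : (sortedDedup l).Pairwise (· < ·) := PySem.List.sorted_ofList_pairwise_lt l
  have hperm : (sortedDedup l).Perm (PySem.Set.ofList l) := PySem.List.sorted_perm _ _ _
  by_cases hv : v ∈ l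
  · have hv' : v ∈ PySem.Set.ofList l := (PySem.Set.mem_ofList _ _).mpr hv
    have : PySem.Set.add (PySem.Set.ofList l) v = PySem.Set.ofList l := PySem.Set.add_of_mem hv'
    rw [sortedDedup, hset, this, insU_of_mem hpw (hperm.mem_iff.mpr hv')]
    rfl
  · have hv' : v ∉ PySem.Set.ofList l := fun h => hv ((PySem.Set.mem_ofList _ _).mp h)
    have hadd : PySem.Set.add (PySem.Set.ofList l) v = PySem.Set.ofList l ++ [v] :=
      PySem.Set.add_of_not_mem hv'
    have hvs : v ∉ sortedDedup l := fun h => hv' (hperm.mem_iff.mp h)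
    rw [sortedDedup, hset, hadd]
    exact PySem.List.sorted_eq_of_perm_of_pairwise_lt _ _ _
      ((insU_perm hvs).trans (hperm.append_right [v]))
      (insU_pairwise hpw hvs)

theorem items_mapVal {κ ν ν' : Type} [BEq κ] (f : ν → ν') (d : PySem.Dict κ ν) :
    (mapVal f d).items = d.items.map (fun p => (p.1, f p.2)) := rfl

theorem get?_mapVal {κ ν ν' : Type} [BEq κ] (f : ν → ν') (d : PySem.Dict κ ν) (k : κ) :
    (mapVal f d).get? k = (d.get? k).map f := by
  obtain ⟨items⟩ := d
  induction items with
  | nil => rfl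
  | cons p rest ih =>
    obtain ⟨pk, pv⟩ := p
    have : mapVal f (PySem.Dict.mk ((pk, pv) :: rest)) =
        PySem.Dict.mk ((pk, f pv) :: rest.map (fun p => (p.1, f p.2))) := rfl
    rw [this, PySem.Dict.get?_mk_cons, PySem.Dict.get?_mk_cons]
    split
    · rfl
    · exact ih

theorem contains_mapVal {κ ν ν' : Type} [BEq κ] (f : ν → ν') (d : PySem.Dict κ ν) (k : κ) :
    (mapVal f d).contains k = d.contains k := by
  rw [PySem.Dict.contains_eq_isSome_get?, PySem.Dict.contains_eq_isSome_get?, get?_mapVal]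
  cases d.get? k <;> rfl

theorem insert_mapVal {κ ν ν' : Type} [BEq κ] [LawfulBEq κ] (f : ν → ν') (d : PySem.Dict κ ν) (k : κ) (v : ν) :
    (mapVal f d).insert k (f v) = mapVal f (d.insert k v) := by
  apply PySem.Dict.ext
  rw [PySem.Dict.items_insert, items_mapVal, items_mapVal, PySem.Dict.items_insert, contains_mapVal]
  split
  · rw [List.map_map, List.map_map]
    apply List.map_congr_left
    intro p _
    by_cases h : p.1 == k <;> simp [h]
  · simp

theorem getD_mapVal_of_f_default {κ ν ν' : Type} [BEq κ] (f : ν → ν') (d : PySem.Dict κ ν)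
    (k : κ) (d0 : ν) (d0' : ν') (h : f d0 = d0') :
    (mapVal f d).getD k d0' = f (d.getD k d0) := by
  rw [PySem.Dict.getD_eq_get?_getD, PySem.Dict.getD_eq_get?_getD, get?_mapVal]
  cases d.get? k
  · exact h.symm
  · rfl

def mapInner (d : PySem.Dict String (PySem.Dict String (List String))) :
    PySem.Dict String (PySem.Dict String (List String)) :=
  mapVal (fun inner => mapVal sortedDedup inner) d

theorem step_comm (d : PySem.Dict String (PySem.Dict String (List String)))
    (x : String × String × String) :
    (let columns := (mapInner d).getD x.1 PySem.Dict.empty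
     (mapInner d).insert x.1 (columns.insert x.2.1 (insSortedUnique (columns.getD x.2.1 []) x.2.2)))
    = mapInner
    (let inner := d.getD x.1 PySem.Dict.empty
     d.insert x.1 (inner.insert x.2.1 (inner.getD x.2.1 [] ++ [x.2.2]))) := by
  obtain ⟨t, c, v⟩ := x
  show (mapInner d).insert t (((mapInner d).getD t PySem.Dict.empty).insert c
      (insSortedUnique (((mapInner d).getD t PySem.Dict.empty).getD c []) v))
    = mapInner (d.insert t ((d.getD t PySem.Dict.empty).insert c
      ((d.getD t PySem.Dict.empty).getD c [] ++ [v])))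
  simp only [mapInner]
  rw [getD_mapVal_of_f_default _ d t PySem.Dict.empty PySem.Dict.empty rfl]
  rw [getD_mapVal_of_f_default sortedDedup _ c [] [] rfl]
  rw [← sortedDedup_append_singleton]
  rw [insert_mapVal sortedDedup]
  rw [insert_mapVal (fun inner => mapVal sortedDedup inner) d t]

theorem foldl_comm (vs : List (String × String × String))
    (d : PySem.Dict String (PySem.Dict String (List String))) :
    vs.foldl (fun d x =>
      let columns := PySem.Dict.getD d x.1 PySem.Dict.empty
      PySem.Dict.insert d x.1 (columns.insert x.2.1 (insSortedUnique (columns.getD x.2.1 []) x.2.2)))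
      (mapInner d)
    = mapInner (vs.foldl (fun d x =>
      let inner := PySem.Dict.getD d x.1 PySem.Dict.empty
      PySem.Dict.insert d x.1 (inner.insert x.2.1 (inner.getD x.2.1 [] ++ [x.2.2]))) d) := by
  induction vs generalizing d with
  | nil => rfl
  | cons x vs ih =>
    rw [List.foldl_cons, List.foldl_cons, step_comm, ih]

-- ===== VERDICT (by name: the statement is the Claim_ definition above) =====
theorem serialize_distinct_payloads_spec : Claim_equal_serialize_distinct_payloads := by
  intro vs _
  unfold Spec_serialize_distinct_payloads serialize_distinct_payloads serialize_distinct_payloads_alt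
  have h := foldl_comm vs PySem.Dict.empty
  have h0 : mapInner PySem.Dict.empty = PySem.Dict.empty := rfl
  rw [h0] at h
  rw [h]
  simp only [mapInner, items_mapVal, List.map_map]
  rfl
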